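-- pv_equiv track=rewrite | github.com/amirhosseinhajian/Computational-intelligence-course | Neural Networks/Pattern storage and noise removal in discrete Hopfield network/character_recognition.py | computing_weights
-- ===== SOURCE A (Python) =====
-- def computing_weights(smp):
--     # convert to bipolar
--     vector = []
--     for i in range(len(smp)):
--         if smp[i] == 0:
--             vector.append(-1)
--         else:
--             vector.append(1)
--     weight = []
--     for i in range(len(vector)):
--         buffer = []
--         for j in range(len(vector)):
--             if i == j:
--                 buffer.append(0)
--             else:
--                 buffer.append(vector[i] * vector[j])
--         weight.append(buffer)
--     return weight
-- ===== SOURCE B (Python) =====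
-- def computing_weights(smp):
--     # Comparison-based rebuild: no bipolar vector, no multiplications.
--     # weight[i][j] = +1 iff smp[i] and smp[j] have the same zero-ness, -1 otherwise,
--     # diagonal 0. Only two distinct row templates exist, so precompute both once
--     # and assemble each row by copying its template and zeroing the diagonal slot.
--     b = [x == 0 for x in smp]
--     row_zero = [1 if t else -1 for t in b]      # template for rows where smp[i] == 0
--     row_nonzero = [-1 if t else 1 for t in b]   # template for rows where smp[i] != 0
--     weight = []
--     for i, bi in enumerate(b):
--         r = (row_zero if bi else row_nonzero).copy()
--         r[i] = 0
--         weight.append(r)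
--     return weight
-- ===== Notes on version B (the rewrite author's own statement) =====
-- stated objective: alternative
-- what changed: Drops the bipolar vector and all multiplications: entries come from comparing zero-ness flags (+1 if equal, -1 if not), and since only two distinct row templates exist B precomputes both once and builds each row by copying its template and zeroing the diagonal slot.
import Mathlib
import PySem

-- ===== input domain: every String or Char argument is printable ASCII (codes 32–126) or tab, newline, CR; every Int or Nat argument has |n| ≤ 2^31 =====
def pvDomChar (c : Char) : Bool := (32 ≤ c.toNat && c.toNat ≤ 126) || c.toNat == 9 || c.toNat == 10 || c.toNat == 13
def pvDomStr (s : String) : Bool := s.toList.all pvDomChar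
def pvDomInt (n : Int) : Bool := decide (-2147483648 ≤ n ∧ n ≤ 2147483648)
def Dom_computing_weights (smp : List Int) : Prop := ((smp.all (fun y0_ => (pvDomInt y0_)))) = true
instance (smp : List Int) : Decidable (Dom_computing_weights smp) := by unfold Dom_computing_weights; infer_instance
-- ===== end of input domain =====

-- ===== PORT A =====
def computing_weights (smp : List Int) : List (List Int) :=
  let vector : List Int :=
    (PySem.List.pyRange 0 smp.length 1).foldl
      (fun acc i => acc ++ [if PySem.List.pyGetD smp i 0 = 0 then (-1 : Int) else 1]) []
  (PySem.List.pyRange 0 vector.length 1).foldl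
    (fun w i => w ++ [
      (PySem.List.pyRange 0 vector.length 1).foldl
        (fun buf j => buf ++ [if i = j then (0 : Int)
          else PySem.List.pyGetD vector i 0 * PySem.List.pyGetD vector j 0]) []]) []

-- ===== PORT B =====
-- B: zero-ness flags, two precomputed row templates, each row = template copy with diagonal set to 0.
def computing_weights_alt (smp : List Int) : List (List Int) :=
  let b : List Bool := smp.map (fun x => decide (x = 0))
  let rowZero : List Int := b.map (fun t => if t then (1 : Int) else -1)
  let rowNonzero : List Int := b.map (fun t => if t then (-1 : Int) else 1)
  (PySem.List.enumerate b 0).foldl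
    (fun w p => w ++ [(if p.2 then rowZero else rowNonzero).set p.1.toNat 0]) []

-- ===== PRECONDITION & SPEC =====
def Spec_computing_weights (smp : List Int) (out : List (List Int)) : Prop := out = computing_weights_alt smp
instance (smp : List Int) (out : List (List Int)) : Decidable (Spec_computing_weights smp out) := by unfold Spec_computing_weights; infer_instance

-- ===== CLAIM (what is proved, stated in full; the proofs are below) =====
def Claim_equal_computing_weights : Prop := ∀ (smp : List Int), Dom_computing_weights smp → Spec_computing_weights smp (computing_weights smp)

-- ===== LEMMAS AND PROOFS =====

-- A's row k equals B's row k: the template for smp[k]'s zero-ness with position k set to 0.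
lemma row_eq (smp : List Int) (k : Nat) (hk : k < smp.length) :
    (PySem.List.pyRange 0 smp.length 1).map
      (fun j => if (k : Int) = j then (0:Int)
        else PySem.List.pyGetD (smp.map (fun x => if x = 0 then (-1 : Int) else 1)) (k:Int) 0
           * PySem.List.pyGetD (smp.map (fun x => if x = 0 then (-1 : Int) else 1)) j 0)
    = (if decide (smp[k] = 0)
        then (smp.map (fun x => decide (x = 0))).map (fun t => if t then (1 : Int) else -1)
        else (smp.map (fun x => decide (x = 0))).map (fun t => if t then (-1 : Int) else 1)).set k 0 := by
  set v := smp.map (fun x => if x = 0 then (-1 : Int) else 1) with hv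
  have hlv : v.length = smp.length := by simp [hv]
  apply List.ext_getElem
  · by_cases h : smp[k] = 0 <;> simp [PySem.List.length_pyRange_one, h]
  · intro j hj1 hj2
    have hjn : j < smp.length := by simpa [PySem.List.length_pyRange_one] using hj1
    rw [List.getElem_map, PySem.List.getElem_pyRange_one]
    have hgk : PySem.List.pyGetD v (k:Int) 0 = v[k]'(by omega) := by
      rw [PySem.List.pyGetD_eq_getElem v 0 (by positivity) (by omega)]; simp
    have hgj : PySem.List.pyGetD v ((0:Int) + (j:Int)) 0 = v[j]'(by omega) := by
      rw [PySem.List.pyGetD_eq_getElem v 0 (by positivity) (by omega)]; simp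
    rw [hgk, hgj]
    by_cases hkj : (k : Int) = (0 : Int) + (j : Int)
    · have hjk : j = k := by omega
      subst hjk
      rw [if_pos hkj]
      by_cases h : smp[j] = 0 <;> simp [h]
    · have hne : j ≠ k := by omega
      have hvk : v[k]'(by omega) = if smp[k] = 0 then (-1:Int) else 1 := by simp [hv]
      have hvj : v[j]'(by omega) = if smp[j] = 0 then (-1:Int) else 1 := by simp [hv]
      rw [if_neg hkj, hvk, hvj]
      by_cases h1 : smp[k] = 0 <;> by_cases h2 : smp[j] = 0 <;>
        simp [h1, h2, hne.symm]

lemma computing_weights_eq_alt (smp : List Int) :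
    computing_weights smp = computing_weights_alt smp := by
  unfold computing_weights computing_weights_alt
  simp only [PySem.List.foldl_append_singleton_eq_map, List.nil_append]
  set v := smp.map (fun x => if x = 0 then (-1 : Int) else 1) with hvdef
  have hv : (PySem.List.pyRange 0 smp.length 1).map
      (fun i => if PySem.List.pyGetD smp i 0 = 0 then (-1:Int) else 1) = v := by
    rw [hvdef, show (fun i => if PySem.List.pyGetD smp i 0 = 0 then (-1:Int) else 1)
        = (fun x => if x = 0 then (-1:Int) else 1) ∘ (fun i => PySem.List.pyGetD smp i 0) from rfl,
      ← List.map_map]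
    rw [PySem.List.map_pyGetD_pyRange_zero' smp 0]
  rw [hv]
  set b := smp.map (fun x => decide (x = 0)) with hbdef
  apply List.ext_getElem
  · simp [PySem.List.length_pyRange_one, PySem.List.length_enumerate, hvdef, hbdef]
  · intro k hk1 hk2
    have hkn : k < smp.length := by
      simpa [PySem.List.length_pyRange_one, hvdef] using hk1
    have hkb : k < b.length := by simp [hbdef]; omega
    rw [List.getElem_map, List.getElem_map, PySem.List.getElem_pyRange_one,
      PySem.List.getElem_enumerate]
    simp only [zero_add]
    have hbk : b[k]'hkb = decide (smp[k] = 0) := by simp [hbdef]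
    have hlv : v.length = smp.length := by simp [hvdef]
    have := row_eq smp k hkn
    simp only [← hvdef, ← hbdef, hlv] at this ⊢
    rw [hbk, Int.toNat_natCast]
    exact this

-- ===== VERDICT (by name: the statement is the Claim_ definition above) =====
theorem computing_weights_spec : Claim_equal_computing_weights := by
  intro smp _
  exact computing_weights_eq_alt smp
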